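-- pv_equiv track=rewrite | github.com/lpaus967/FNWM | scripts/ingestion/weather/wind/utils.py | find_nearest_hour
-- ===== SOURCE A (Python) =====
-- def find_nearest_hour(target_hour: int, available_hours: list, prefer_future: bool = True) -> int:
--     """
--     Find the nearest available hour to the target hour.
--
--     Args:
--         target_hour: Target hour (0-23)
--         available_hours: List of available hours
--         prefer_future: If True, prefer future hours over past hours
--
--     Returns:
--         int: Nearest available hour, or None if no hours available
--     """
--     if not available_hours:
--         return None
--
--     if target_hour in available_hours:
--         return target_hour
--
--     # Calculate distances
--     distances = []
--     for hour in available_hours: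
--         diff = abs(hour - target_hour)
--         # Consider wrapping around midnight
--         wrapped_diff = min(diff, 24 - diff)
--
--         # Prefer future hours if specified
--         if prefer_future and hour >= target_hour:
--             priority = 0  # Higher priority
--         else:
--             priority = 1  # Lower priority
--
--         distances.append((wrapped_diff, priority, hour))
--
--     # Sort by distance, then priority
--     distances.sort()
--     return distances[0][2]
-- ===== SOURCE B (Python) =====
-- def find_nearest_hour(target_hour: int, available_hours: list, prefer_future: bool = True) -> int:
--     if not available_hours:
--         return None
--     if target_hour in available_hours:
--         return target_hour
--
--     def key(h):
--         diff = abs(h - target_hour)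
--         return (min(diff, 24 - diff),
--                 0 if prefer_future and h >= target_hour else 1,
--                 h)
--
--     return min(available_hours, key=key)
-- ===== Notes on version B (the rewrite author's own statement) =====
-- stated objective: simpler
-- what changed: B drops A's intermediate distances list and its full sort, selecting the answer in one pass with min over the hours using the same (wrapped_diff, priority, hour) key tuple.
import Mathlib
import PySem

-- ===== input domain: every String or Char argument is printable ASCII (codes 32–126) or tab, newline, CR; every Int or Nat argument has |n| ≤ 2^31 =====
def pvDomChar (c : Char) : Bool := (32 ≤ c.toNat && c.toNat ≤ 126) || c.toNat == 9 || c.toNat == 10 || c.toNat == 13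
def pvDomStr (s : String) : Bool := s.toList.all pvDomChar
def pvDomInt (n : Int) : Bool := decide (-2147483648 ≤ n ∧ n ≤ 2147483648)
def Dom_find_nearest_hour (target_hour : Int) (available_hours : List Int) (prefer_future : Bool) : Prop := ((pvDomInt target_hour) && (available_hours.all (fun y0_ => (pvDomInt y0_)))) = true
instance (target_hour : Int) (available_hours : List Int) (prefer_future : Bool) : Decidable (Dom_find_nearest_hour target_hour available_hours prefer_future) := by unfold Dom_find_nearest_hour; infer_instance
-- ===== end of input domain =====

-- B replaces A's build-distances-list + stable sort + take-first by a single-pass min over the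
-- hours with the same lexicographic key (simpler; no intermediate list, no sort).

-- ===== PORT A =====
-- Python sorts the (wrapped_diff, priority, hour) tuples lexicographically; the stable sort
-- PySem.List.sorted with the lexicographic key 'toLex (t.1, toLex (t.2.1, t.2.2))' is exact.
def find_nearest_hour (target_hour : Int) (available_hours : List Int) (prefer_future : Bool) : Option Int :=
  if available_hours = [] then none
  else if target_hour ∈ available_hours then some target_hour
  else
    -- for hour in available_hours: distances.append((wrapped_diff, priority, hour))
    let distances : List (Int × Int × Int) := available_hours.foldl (fun acc hour =>
      let diff := |hour - target_hour|
      let wrapped_diff := min diff (24 - diff)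
      let priority : Int := if prefer_future = true ∧ target_hour ≤ hour then 0 else 1
      acc ++ [(wrapped_diff, priority, hour)]) []
    -- distances.sort(); return distances[0][2]
    match PySem.List.sorted distances (fun t => toLex (t.1, toLex (t.2.1, t.2.2))) false with
    | [] => none
    | t :: _ => some t.2.2

-- ===== PORT B =====
-- min(available_hours, key=…) with a tuple key: PySem.List.min? (first minimal element) with the
-- same tuple read lexicographically (toLex), exactly Python's tuple comparison.
def find_nearest_hour_alt (target_hour : Int) (available_hours : List Int) (prefer_future : Bool) : Option Int :=
  if available_hours = [] then none
  else if target_hour ∈ available_hours then some target_hour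
  else
    PySem.List.min? available_hours (fun h =>
      let diff := |h - target_hour|
      toLex (min diff (24 - diff),
             toLex ((if prefer_future = true ∧ target_hour ≤ h then (0 : Int) else 1), h)))

-- ===== PRECONDITION & SPEC =====
def Spec_find_nearest_hour (target_hour : Int) (available_hours : List Int) (prefer_future : Bool) (out : Option Int) : Prop := out = find_nearest_hour_alt target_hour available_hours prefer_future
instance (target_hour : Int) (available_hours : List Int) (prefer_future : Bool) (out : Option Int) : Decidable (Spec_find_nearest_hour target_hour available_hours prefer_future out) := by unfold Spec_find_nearest_hour; infer_instance

-- ===== CLAIM (what is proved, stated in full; the proofs are below) =====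
def Claim_equal_find_nearest_hour : Prop := ∀ (target_hour : Int) (available_hours : List Int) (prefer_future : Bool), Dom_find_nearest_hour target_hour available_hours prefer_future → Spec_find_nearest_hour target_hour available_hours prefer_future (find_nearest_hour target_hour available_hours prefer_future)

-- ===== LEMMAS AND PROOFS =====

-- the shared key, at the level of hours
def pvKey (target_hour : Int) (prefer_future : Bool) (h : Int) : Int ×ₗ (Int ×ₗ Int) :=
  toLex (min |h - target_hour| (24 - |h - target_hour|),
         toLex ((if prefer_future = true ∧ target_hour ≤ h then (0 : Int) else 1), h))

theorem pvKey_inj (target_hour : Int) (prefer_future : Bool) :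
    Function.Injective (pvKey target_hour prefer_future) := by
  intro a b hab
  have := congrArg (fun k => (ofLex (ofLex k).2).2) hab
  simpa [pvKey] using this

theorem find_nearest_hour_eq (target_hour : Int) (available_hours : List Int) (prefer_future : Bool) :
    find_nearest_hour target_hour available_hours prefer_future
      = find_nearest_hour_alt target_hour available_hours prefer_future := by
  unfold find_nearest_hour find_nearest_hour_alt
  split_ifs with hnil hmem
  · rfl
  · rfl
  · -- distances is a map of the key triple over the hours
    have hdist :
        available_hours.foldl (fun acc hour =>
          acc ++ [(min |hour - target_hour| (24 - |hour - target_hour|),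
                   (if prefer_future = true ∧ target_hour ≤ hour then (0 : Int) else 1), hour)]) []
        = available_hours.map (fun hour =>
            (min |hour - target_hour| (24 - |hour - target_hour|),
             (if prefer_future = true ∧ target_hour ≤ hour then (0 : Int) else 1), hour)) := by
      simpa using PySem.List.foldl_append_singleton_eq_map
        (fun hour => (min |hour - target_hour| (24 - |hour - target_hour|),
             (if prefer_future = true ∧ target_hour ≤ hour then (0 : Int) else 1), hour))
        available_hours []
    simp only []
    rw [hdist]
    set f : Int → Int × Int × Int := fun hour =>
      (min |hour - target_hour| (24 - |hour - target_hour|),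
       (if prefer_future = true ∧ target_hour ≤ hour then (0 : Int) else 1), hour) with hf
    set kt : Int × Int × Int → Int ×ₗ (Int ×ₗ Int) :=
      fun t => toLex (t.1, toLex (t.2.1, t.2.2)) with hkt
    have hcomp : ∀ h : Int, kt (f h) = pvKey target_hour prefer_future h := by
      intro h; simp [hkt, hf, pvKey]
    -- the sorted list is nonempty
    cases hs : PySem.List.sorted (available_hours.map f) kt false with
    | nil =>
        exfalso
        rw [PySem.List.sorted_eq_nil_iff] at hs
        exact hnil (by simpa using hs)
    | cons m rest =>
        -- m comes from some hour, minimal under the key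
        have hmemm : m ∈ available_hours.map f := by
          have : m ∈ PySem.List.sorted (available_hours.map f) kt false := by
            rw [hs]; exact List.mem_cons_self ..
          exact (PySem.List.mem_sorted ..).1 this
        obtain ⟨h, hh, hfh⟩ := List.mem_map.1 hmemm
        have hminA : ∀ y ∈ available_hours, pvKey target_hour prefer_future h ≤ pvKey target_hour prefer_future y := by
          intro y hy
          have := PySem.List.key_head_sorted_le (available_hours.map f) kt hs (f y) (List.mem_map_of_mem hy)
          rw [← hfh] at this
          simpa [hcomp] using this
        -- B's min? is some r, minimal under the same key
        cases hr : PySem.List.min? available_hours (pvKey target_hour prefer_future) with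
        | none =>
            exact absurd ((PySem.List.min?_eq_none_iff ..).1 hr) hnil
        | some r =>
            have hminB := PySem.List.min?_isMin hr
            have hrmem := PySem.List.min?_mem hr
            have : pvKey target_hour prefer_future h = pvKey target_hour prefer_future r :=
              le_antisymm (hminA r hrmem) (hminB h hh)
            have hhr : h = r := pvKey_inj target_hour prefer_future this
            have hB : PySem.List.min? available_hours (fun h =>
                let diff := |h - target_hour|
                toLex (min diff (24 - diff),
                       toLex ((if prefer_future = true ∧ target_hour ≤ h then (0 : Int) else 1), h)))
                = some r := by
              simpa [pvKey] using hr
            rw [hB, ← hfh, hf]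
            simpa using hhr

-- ===== VERDICT (by name: the statement is the Claim_ definition above) =====
theorem find_nearest_hour_spec : Claim_equal_find_nearest_hour := by
  intro target_hour available_hours prefer_future _
  unfold Spec_find_nearest_hour
  exact find_nearest_hour_eq target_hour available_hours prefer_future
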